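-- pv_equiv track=rewrite | github.com/thuankxk2701/Python3 | Algorithm/big_int.py | summ_end
-- ===== SOURCE A (Python) =====
-- def summ_end(lst):
--     summ=[];
--     y = [j for j in range(len(lst[0]))];
--     ex = len(lst)-1;
--     for m in range(len(y)):
--         s = 0;
--         i=ex;
--         j=m;
--         while i>=0 and j<=y[-1]:
--             s= s+lst[i][j];
--             if i%2==1:
--                 j = j+1;
--             else:
--                 j=j;
--             i = i-1;
--         summ.append(s);
--     return summ;
-- ===== SOURCE B (Python) =====
-- def summ_end(lst):
--     width = len(lst[0])
--     summ = [0] * width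
--     off = 0
--     for i in range(len(lst) - 1, -1, -1):
--         row = lst[i]
--         for m in range(width - off):
--             summ[m] += row[m + off]
--         if i % 2 == 1:
--             off += 1
--     return summ
-- ===== Notes on version B (the rewrite author's own statement) =====
-- stated objective: alternative
-- what changed: B replaces A's column-major walk (one while-loop diagonal path per starting column, with early exit) by a single row-major pass that scatters each row's cells into all output accumulators at a shared running offset incremented after odd rows.
import Mathlib
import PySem

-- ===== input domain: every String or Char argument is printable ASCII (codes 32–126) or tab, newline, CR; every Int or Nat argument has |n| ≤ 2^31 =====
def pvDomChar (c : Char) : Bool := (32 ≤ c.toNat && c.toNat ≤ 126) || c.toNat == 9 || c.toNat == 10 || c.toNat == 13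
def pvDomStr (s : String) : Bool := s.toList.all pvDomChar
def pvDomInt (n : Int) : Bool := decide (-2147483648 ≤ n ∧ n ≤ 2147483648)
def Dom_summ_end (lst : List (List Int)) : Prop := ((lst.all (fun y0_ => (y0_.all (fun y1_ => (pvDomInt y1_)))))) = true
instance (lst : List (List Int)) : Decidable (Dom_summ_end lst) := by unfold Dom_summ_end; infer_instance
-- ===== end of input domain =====

-- B re-decomposes A's per-starting-column diagonal walks (with early while-exit) as one
-- row-major pass that scatters each row's cells into all the accumulators at a shared
-- running offset; same cost class, different traversal ('alternative' objective).

-- ===== PORT A =====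
-- the while loop of A: counter n encodes i = n - 1 (n = 0 ⟺ i = -1, loop over);
-- 'while i>=0 and j<=last: s += lst[i][j]; if i%2==1: j+=1; i-=1'
def whileA (lst : List (List Int)) (last : Int) : Nat → Int → Int → Int
  | 0, _, s => s
  | n + 1, j, s =>
    if j ≤ last then
      whileA lst last n (if (n : Int) % 2 == 1 then j + 1 else j)
        (s + PySem.List.pyGetD (PySem.List.pyGetD lst (n : Int) []) j 0)
    else s

def summ_end (lst : List (List Int)) : List Int :=
  -- y = range(len(lst[0])); y[-1] = len(lst[0]) - 1 (unused when that length is 0);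
  -- for m in range(len(y)): summ.append(while-loop from i = len(lst)-1, j = m, s = 0)
  (List.range (PySem.List.pyGetD lst 0 []).length).foldl
    (fun summ (m : Nat) =>
      summ ++ [whileA lst (((PySem.List.pyGetD lst 0 []).length : Int) - 1) lst.length (m : Int) 0]) []

-- ===== PORT B =====
-- iterate i from len(lst)-1 down to 0 (counter n encodes i = n - 1), carrying (summ, off);
-- inner 'for m in range(width - off): summ[m] += row[m + off]' is the foldl of set-updates
def scatterB (lst : List (List Int)) (width : Nat) : Nat → List Int → Nat → List Int
  | 0, summ, _ => summ
  | n + 1, summ, off =>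
    scatterB lst width n
      ((List.range (width - off)).foldl
        (fun acc m => acc.set m
          (acc.getD m 0 + PySem.List.pyGetD (PySem.List.pyGetD lst (n : Int) []) ((m + off : Nat) : Int) 0)) summ)
      (if (n : Int) % 2 == 1 then off + 1 else off)

def summ_end_alt (lst : List (List Int)) : List Int :=
  scatterB lst (PySem.List.pyGetD lst 0 []).length lst.length
    (List.replicate (PySem.List.pyGetD lst 0 []).length 0) 0

-- ===== PRECONDITION & SPEC =====
-- Pre_ is exactly where A returns normally: lst nonempty (else lst[0] raises IndexError),
-- and every row the diagonals actually touch is at least as long as row 0 (else lst[i][j]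
-- raises IndexError).  Row i (counting from 0, N rows) is touched iff its running diagonal
-- offset N/2 - (i+1)/2 (the number of odd indices above it) is < len(lst[0]).
def Pre_summ_end (lst : List (List Int)) : Prop :=
  lst ≠ [] ∧ ∀ i < lst.length,
    lst.length / 2 - (i + 1) / 2 < (lst.headD []).length →
      (lst.headD []).length ≤ (lst.getD i []).length
instance (lst : List (List Int)) : Decidable (Pre_summ_end lst) := by
  unfold Pre_summ_end; infer_instance
def pvWitness_summ_end : List (List Int) := [[1, 2], [3, 4]]
def Spec_summ_end (lst : List (List Int)) (out : List Int) : Prop := out = summ_end_alt lst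
instance (lst : List (List Int)) (out : List Int) : Decidable (Spec_summ_end lst out) := by
  unfold Spec_summ_end; infer_instance

-- ===== CLAIM (what is proved, stated in full; the proofs are below) =====
def Claim_equal_summ_end : Prop :=
  ∀ (lst : List (List Int)), Dom_summ_end lst → Pre_summ_end lst → Spec_summ_end lst (summ_end lst)

-- ===== LEMMAS AND PROOFS =====

-- per-cell-guarded full scan with Int column index: the characterisation of A's while loop
def scanSum (lst : List (List Int)) (last : Int) : Nat → Int → Int
  | 0, _ => 0
  | n + 1, j =>
    (if j ≤ last then PySem.List.pyGetD (PySem.List.pyGetD lst (n : Int) []) j 0 else 0)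
      + scanSum lst last n (if (n : Int) % 2 == 1 then j + 1 else j)

-- the same scan with the column split as start m plus running offset (Nat): B's shape
def scanSumN (lst : List (List Int)) (width : Nat) : Nat → Nat → Nat → Int
  | 0, _, _ => 0
  | n + 1, m, off =>
    (if m + off < width then PySem.List.pyGetD (PySem.List.pyGetD lst (n : Int) []) ((m + off : Nat) : Int) 0 else 0)
      + scanSumN lst width n m (if (n : Int) % 2 == 1 then off + 1 else off)

theorem scanSum_of_gt (lst : List (List Int)) (last : Int) :
    ∀ (n : Nat) (j : Int), last < j → scanSum lst last n j = 0 := by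
  intro n
  induction n with
  | zero => intro j _; rfl
  | succ n ih =>
    intro j hj
    unfold scanSum
    rw [if_neg (by omega)]
    rw [ih _ (by split <;> omega)]
    ring

theorem whileA_eq_scanSum (lst : List (List Int)) (last : Int) :
    ∀ (n : Nat) (j s : Int), whileA lst last n j s = s + scanSum lst last n j := by
  intro n
  induction n with
  | zero => intro j s; simp [whileA, scanSum]
  | succ n ih =>
    intro j s
    unfold whileA scanSum
    by_cases hj : j ≤ last
    · rw [if_pos hj, if_pos hj, ih]; ring
    · rw [if_neg hj, if_neg hj, scanSum_of_gt _ _ _ _ (by split <;> omega)]; ring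

theorem scanSumN_eq_scanSum (lst : List (List Int)) (width : Nat) :
    ∀ (n m off : Nat),
      scanSumN lst width n m off = scanSum lst ((width : Int) - 1) n ((m : Int) + (off : Int)) := by
  intro n
  induction n with
  | zero => intro m off; rfl
  | succ n ih =>
    intro m off
    have hcell : ((m + off : Nat) : Int) = (m : Int) + (off : Int) := by push_cast; ring
    have hoff1 : ((off + 1 : Nat) : Int) = (off : Int) + 1 := by push_cast; ring
    have hguard : (m + off < width) ↔ ((m : Int) + (off : Int) ≤ (width : Int) - 1) := by omega
    unfold scanSumN scanSum
    rcases Decidable.em (((n : Int) % 2 == 1) = true) with hpar | hpar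
    · rw [if_pos hpar, if_pos hpar, ih, hoff1, ← add_assoc]
      by_cases hg : m + off < width
      · rw [if_pos hg, if_pos (hguard.mp hg), hcell]
      · rw [if_neg hg, if_neg (fun h => hg (hguard.mpr h))]
    · rw [if_neg hpar, if_neg hpar, ih]
      by_cases hg : m + off < width
      · rw [if_pos hg, if_pos (hguard.mp hg), hcell]
      · rw [if_neg hg, if_neg (fun h => hg (hguard.mpr h))]

-- the inner foldl of set-updates, characterised pointwise
theorem foldl_set_range (f : Nat → Int) :
    ∀ (k : Nat) (summ : List Int), k ≤ summ.length →
      (List.range k).foldl (fun acc m => acc.set m (acc.getD m 0 + f m)) summ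
        = summ.mapIdx (fun m v => if m < k then v + f m else v) := by
  intro k
  induction k with
  | zero =>
    intro summ _
    apply List.ext_getElem <;> simp [List.getElem_mapIdx]
  | succ k ih =>
    intro summ hk
    rw [List.range_succ, List.foldl_append, List.foldl_cons, List.foldl_nil, ih _ (by omega)]
    apply List.ext_getElem
    · simp
    · intro i h1 h2
      simp only [List.length_set, List.length_mapIdx] at h1 h2
      have hgd : (summ.mapIdx fun m v => if m < k then v + f m else v).getD k 0
          = summ[k]'(by omega) := by
        rw [List.getD_eq_getElem _ _ (by simpa using hk), List.getElem_mapIdx]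
        simp
      simp only [List.getElem_set, List.getElem_mapIdx, hgd]
      by_cases hik : k = i
      · subst hik
        rw [if_pos rfl, if_pos (Nat.lt_succ_self k)]
      · rw [if_neg hik]
        by_cases hlt : i < k
        · rw [if_pos hlt, if_pos (by omega)]
        · rw [if_neg hlt, if_neg (by omega)]

-- scatterB characterised: accumulator m gains the guarded scan of column m at running offset off
theorem scatterB_eq (lst : List (List Int)) (width : Nat) :
    ∀ (n : Nat) (summ : List Int) (off : Nat), summ.length = width →
      scatterB lst width n summ off
        = summ.mapIdx (fun m v => v + scanSumN lst width n m off) := by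
  intro n
  induction n with
  | zero =>
    intro summ off _
    unfold scatterB
    apply List.ext_getElem <;> simp [List.getElem_mapIdx, scanSumN]
  | succ n ih =>
    intro summ off hlen
    unfold scatterB
    rw [foldl_set_range _ _ _ (by omega),
      ih _ _ (by simp only [List.length_mapIdx]; exact hlen)]
    apply List.ext_getElem
    · simp
    · intro i h1 h2
      simp only [List.length_mapIdx] at h1 h2
      simp only [List.getElem_mapIdx]
      have hsucc : scanSumN lst width (n + 1) i off
          = (if i + off < width then
                PySem.List.pyGetD (PySem.List.pyGetD lst (n : Int) []) ((i + off : Nat) : Int) 0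
              else 0)
            + scanSumN lst width n i (if (n : Int) % 2 == 1 then off + 1 else off) := rfl
      rw [hsucc]
      by_cases hg : i < width - off
      · have hgi : i + off < width := by omega
        rw [if_pos hg, if_pos hgi]
        ring
      · have hgi : ¬ i + off < width := by omega
        rw [if_neg hg, if_neg hgi]
        ring

-- A's outer append-fold over range is a map
theorem foldl_append_map (g : Nat → Int) (k : Nat) :
    (List.range k).foldl (fun summ m => summ ++ [g m]) [] = (List.range k).map g := by
  rw [← List.foldl_map (f := g) (g := fun summ x => summ ++ [x])]
  induction (List.range k).map g using List.reverseRecOn with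
  | nil => rfl
  | append_singleton xs x ih => simp [ih]

-- ===== VERDICT (by name: the statement is the Claim_ definition above) =====
theorem summ_end_spec : Claim_equal_summ_end := by
  intro lst _ _
  unfold Spec_summ_end summ_end summ_end_alt
  rw [foldl_append_map, scatterB_eq _ _ _ _ _ (by simp)]
  apply List.ext_getElem
  · simp
  · intro i h1 h2
    simp only [List.getElem_map, List.getElem_range, List.getElem_mapIdx, List.getElem_replicate]
    rw [whileA_eq_scanSum, scanSumN_eq_scanSum]
    push_cast
    ring_nf
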